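-- pv_equiv track=rewrite | github.com/ColasGael/advent_of_code | 2020/solver/day23.py | move_cups_naive
-- ===== SOURCE A (Python) =====
-- def move_cups_naive(cups, n_cups_removed=3):
--     current_cup = cups[0]
--     removed_cups = cups[1 : 1 + n_cups_removed]
--     remaining_cups = cups[1 + n_cups_removed :]
--
--     destination_cup_idx, max_cup_idx = None, 0
--     for idx, cup in enumerate(remaining_cups):
--         if current_cup > cup:
--             if (destination_cup_idx is None) or (
--                 cup > remaining_cups[destination_cup_idx]
--             ):
--                 destination_cup_idx = idx
--         elif cup > remaining_cups[max_cup_idx]: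
--             max_cup_idx = idx
--     if destination_cup_idx is None:
--         destination_cup_idx = max_cup_idx
--
--     new_cups = (
--         remaining_cups[: destination_cup_idx + 1]
--         + removed_cups
--         + remaining_cups[destination_cup_idx + 1 :]
--         + [current_cup]
--     )
--     return new_cups
-- ===== SOURCE B (Python) =====
-- def move_cups_naive(cups, n_cups_removed=3):
--     current_cup = cups[0]
--     removed_cups = cups[1 : 1 + n_cups_removed]
--     remaining_cups = cups[1 + n_cups_removed :]
--
--     if not remaining_cups:
--         return removed_cups + [current_cup]
--
--     below = [c for c in remaining_cups if c < current_cup]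
--     destination_cup = max(below) if below else max(remaining_cups)
--     idx = remaining_cups.index(destination_cup)
--
--     return (
--         remaining_cups[: idx + 1]
--         + removed_cups
--         + remaining_cups[idx + 1 :]
--         + [current_cup]
--     )
-- ===== Notes on version B (the rewrite author's own statement) =====
-- stated objective: simpler
-- what changed: Replaces the fused single-pass index-tracking loop (optional destination index + running max index with repeated lookups) by a compute-value-then-locate decomposition: filter the cups below the current cup, take max of that (or max overall), then list.index the value once.
import Mathlib
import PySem

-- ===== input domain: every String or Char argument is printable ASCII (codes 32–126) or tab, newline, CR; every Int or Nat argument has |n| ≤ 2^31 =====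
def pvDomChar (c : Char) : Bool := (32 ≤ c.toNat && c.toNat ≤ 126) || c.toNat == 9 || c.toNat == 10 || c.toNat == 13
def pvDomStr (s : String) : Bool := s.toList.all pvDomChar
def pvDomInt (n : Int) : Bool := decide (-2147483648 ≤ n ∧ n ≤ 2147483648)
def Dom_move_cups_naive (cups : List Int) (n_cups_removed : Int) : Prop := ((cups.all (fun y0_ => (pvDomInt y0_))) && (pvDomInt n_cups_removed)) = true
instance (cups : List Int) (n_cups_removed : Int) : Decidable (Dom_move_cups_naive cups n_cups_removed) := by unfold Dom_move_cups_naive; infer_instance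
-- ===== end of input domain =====

-- B replaces A's fused single-pass index-tracking loop by a compute-value-then-locate
-- decomposition (filter the cups below the current one, take the max, locate it once);
-- objective: simpler. Same return value on every non-empty cups list.

-- ===== PORT A =====
-- loop body of A: state = (destination_cup_idx : Option Int, max_cup_idx : Int), p = (idx, cup)
-- the pyGetD defaults are unreachable: the stored indices always come from enumerate of rem
def pvStepA (rem : List Int) (cur : Int) (st : Option Int × Int) (p : Int × Int) :
    Option Int × Int :=
  if cur > p.2 then
    match st.1 with
    | none => (some p.1, st.2)
    | some j => if p.2 > PySem.List.pyGetD rem j 0 then (some p.1, st.2) else st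
  else if p.2 > PySem.List.pyGetD rem st.2 0 then (st.1, p.1) else st

def move_cups_naive (cups : List Int) (n_cups_removed : Int) : List Int :=
  -- reading the first element raises IndexError on an empty cups list: excluded by Pre_;
  -- the getD default is unreachable under Pre_
  let current_cup := PySem.List.pyGetD cups 0 0
  let removed_cups := PySem.List.slice cups (some 1) (some (1 + n_cups_removed))
  let remaining_cups := PySem.List.slice cups (some (1 + n_cups_removed)) none
  let st := (PySem.List.enumerate remaining_cups).foldl
              (pvStepA remaining_cups current_cup) (none, 0)
  let destination_cup_idx := st.1.getD st.2
  PySem.List.slice remaining_cups none (some (destination_cup_idx + 1))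
    ++ removed_cups
    ++ PySem.List.slice remaining_cups (some (destination_cup_idx + 1)) none
    ++ [current_cup]

-- ===== PORT B =====
def move_cups_naive_alt (cups : List Int) (n_cups_removed : Int) : List Int :=
  -- reading the first element raises IndexError on an empty cups list: excluded by Pre_;
  -- the getD default is unreachable under Pre_
  let current_cup := PySem.List.pyGetD cups 0 0
  let removed_cups := PySem.List.slice cups (some 1) (some (1 + n_cups_removed))
  let remaining_cups := PySem.List.slice cups (some (1 + n_cups_removed)) none
  if remaining_cups = [] then removed_cups ++ [current_cup]
  else
    let below := remaining_cups.filter (fun c => decide (c < current_cup))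
    -- both max? getD defaults are unreachable (the list is non-empty in each branch),
    -- as is index?'s (the destination value is a member of remaining_cups)
    let destination_cup :=
      if below ≠ [] then (PySem.List.max? below (fun y => y)).getD 0
      else (PySem.List.max? remaining_cups (fun y => y)).getD 0
    let idx : Int := ((PySem.List.index? remaining_cups destination_cup).getD 0 : Nat)
    PySem.List.slice remaining_cups none (some (idx + 1))
      ++ removed_cups
      ++ PySem.List.slice remaining_cups (some (idx + 1)) none
      ++ [current_cup]

-- ===== PRECONDITION & SPEC =====
-- Pre_ excludes only an empty cups list, on which A (and B) raise IndexError reading the first element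
def Pre_move_cups_naive (cups : List Int) (n_cups_removed : Int) : Prop := cups ≠ []
instance (cups : List Int) (n_cups_removed : Int) : Decidable (Pre_move_cups_naive cups n_cups_removed) := by unfold Pre_move_cups_naive; infer_instance
def pvWitness_move_cups_naive : List Int × Int := ([3, 8, 9, 1, 2, 5, 4, 6, 7], 3)

def Spec_move_cups_naive (cups : List Int) (n_cups_removed : Int) (out : List Int) : Prop := out = move_cups_naive_alt cups n_cups_removed
instance (cups : List Int) (n_cups_removed : Int) (out : List Int) : Decidable (Spec_move_cups_naive cups n_cups_removed out) := by unfold Spec_move_cups_naive; infer_instance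

-- ===== CLAIM (what is proved, stated in full; the proofs are below) =====
def Claim_equal_move_cups_naive : Prop := ∀ (cups : List Int) (n_cups_removed : Int), Dom_move_cups_naive cups n_cups_removed → Pre_move_cups_naive cups n_cups_removed → Spec_move_cups_naive cups n_cups_removed (move_cups_naive cups n_cups_removed)

-- ===== LEMMAS AND PROOFS =====

-- value-carrying twin of pvStepA: the state stores (index, value) pairs instead of
-- indices looked up in rem; pvSim below relates the two folds
def pvStepV (cur : Int) (st : Option (Int × Int) × (Int × Int)) (p : Int × Int) :
    Option (Int × Int) × (Int × Int) :=
  if cur > p.2 then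
    match st.1 with
    | none => (some p, st.2)
    | some q => if p.2 > q.2 then (some p, st.2) else st
  else if p.2 > st.2.2 then (st.1, p) else st

-- first (index, value) with value < cur maximising the value, scanning left to right
def pvPickB (cur : Int) : List (Int × Int) → Option (Int × Int)
  | [] => none
  | p :: ps =>
      let r := pvPickB cur ps
      if cur > p.2 then
        match r with
        | none => some p
        | some q => if q.2 > p.2 then some q else some p
      else r

-- first (index, value) with value ≥ cur maximising the value
def pvPickG (cur : Int) : List (Int × Int) → Option (Int × Int)
  | [] => none
  | p :: ps =>
      let r := pvPickG cur ps
      if cur > p.2 then r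
      else
        match r with
        | none => some p
        | some q => if q.2 > p.2 then some q else some p

def pvMergeD (d r : Option (Int × Int)) : Option (Int × Int) :=
  match r with
  | none => d
  | some q =>
    match d with
    | none => some q
    | some p => if q.2 > p.2 then some q else some p

def pvMergeM (m : Int × Int) (r : Option (Int × Int)) : Int × Int :=
  match r with
  | none => m
  | some q => if q.2 > m.2 then q else m

lemma pvSim (rem : List Int) (cur : Int) :
    ∀ (l : List (Int × Int)) (d : Option (Int × Int)) (m : Int × Int),
      (∀ p ∈ l, PySem.List.pyGetD rem p.1 0 = p.2) →
      (∀ q, d = some q → PySem.List.pyGetD rem q.1 0 = q.2) →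
      PySem.List.pyGetD rem m.1 0 = m.2 →
      l.foldl (pvStepA rem cur) (d.map Prod.fst, m.1)
        = ((l.foldl (pvStepV cur) (d, m)).1.map Prod.fst,
           (l.foldl (pvStepV cur) (d, m)).2.1) := by
  intro l
  induction l with
  | nil => intro d m _ _ _; rfl
  | cons p ps ih =>
    intro d m hl hd hm
    have hp : PySem.List.pyGetD rem p.1 0 = p.2 := hl p (by simp)
    have hl' : ∀ q ∈ ps, PySem.List.pyGetD rem q.1 0 = q.2 :=
      fun q hq => hl q (List.mem_cons_of_mem _ hq)
    simp only [List.foldl_cons]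
    by_cases hc : cur > p.2
    · cases d with
      | none =>
        have eA : pvStepA rem cur (Option.map Prod.fst (none : Option (Int × Int)), m.1) p
            = (some p.1, m.1) := by simp [pvStepA, hc]
        have eV : pvStepV cur ((none : Option (Int × Int)), m) p = (some p, m) := by
          simp [pvStepV, hc]
        rw [eA, eV]
        exact ih (some p) m hl'
          (by intro q hq; injection hq with h3; subst h3; exact hp) hm
      | some q0 =>
        have hq0 := hd q0 rfl
        have eA : pvStepA rem cur (Option.map Prod.fst (some q0), m.1) p
            = if p.2 > q0.2 then (some p.1, m.1) else (some q0.1, m.1) := by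
          simp [pvStepA, hc, hq0]
        have eV : pvStepV cur (some q0, m) p
            = if p.2 > q0.2 then (some p, m) else (some q0, m) := by
          simp [pvStepV, hc]
        rw [eA, eV]
        by_cases h2 : p.2 > q0.2
        · rw [if_pos h2, if_pos h2]
          exact ih (some p) m hl'
            (by intro q hq; injection hq with h3; subst h3; exact hp) hm
        · rw [if_neg h2, if_neg h2]
          exact ih (some q0) m hl'
            (by intro q hq; injection hq with h3; subst h3; exact hq0) hm
    · have eA : pvStepA rem cur (Option.map Prod.fst d, m.1) p
          = if p.2 > m.2 then (Option.map Prod.fst d, p.1)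
            else (Option.map Prod.fst d, m.1) := by
        simp [pvStepA, hc, hm]
      have eV : pvStepV cur (d, m) p = if p.2 > m.2 then (d, p) else (d, m) := by
        simp [pvStepV, hc]
      rw [eA, eV]
      by_cases h2 : p.2 > m.2
      · rw [if_pos h2, if_pos h2]; exact ih d p hl' hd hp
      · rw [if_neg h2, if_neg h2]; exact ih d m hl' hd hm

lemma pvFoldV_fst (cur : Int) :
    ∀ (l : List (Int × Int)) (d : Option (Int × Int)) (m : Int × Int),
      (l.foldl (pvStepV cur) (d, m)).1 = pvMergeD d (pvPickB cur l) := by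
  intro l
  induction l with
  | nil => intro d m; simp [pvPickB, pvMergeD]
  | cons p ps ih =>
    intro d m
    simp only [List.foldl_cons, pvPickB]
    by_cases hc : cur > p.2
    · simp only [hc, if_pos]
      cases d with
      | none =>
        have eV : pvStepV cur ((none : Option (Int × Int)), m) p = (some p, m) := by
          simp [pvStepV, hc]
        rw [eV, ih]
        cases hr : pvPickB cur ps with
        | none => simp [pvMergeD]
        | some q' =>
          by_cases h2 : q'.2 > p.2 <;>
            simp only [h2, if_pos, if_neg, not_false_iff, pvMergeD] <;>
              (try split_ifs) <;> first | rfl | (exfalso; omega)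
      | some q =>
        have eV : pvStepV cur (some q, m) p
            = if p.2 > q.2 then (some p, m) else (some q, m) := by
          simp [pvStepV, hc]
        rw [eV]
        by_cases h1 : p.2 > q.2 <;>
          [rw [if_pos h1, ih]; rw [if_neg h1, ih]] <;>
          (cases hr : pvPickB cur ps with
           | none => simp only [pvMergeD]; (try split_ifs) <;> first | rfl | (exfalso; omega)
           | some q' =>
             by_cases h2 : q'.2 > p.2 <;>
               simp only [h2, if_pos, if_neg, not_false_iff, pvMergeD] <;>
                 split_ifs <;> first | rfl | (exfalso; omega))
    · simp only [hc, if_neg, not_false_iff]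
      have eV : pvStepV cur (d, m) p = if p.2 > m.2 then (d, p) else (d, m) := by
        simp [pvStepV, hc]
      rw [eV]
      split_ifs <;> rw [ih]

lemma pvFoldV_snd (cur : Int) :
    ∀ (l : List (Int × Int)) (d : Option (Int × Int)) (m : Int × Int),
      (l.foldl (pvStepV cur) (d, m)).2 = pvMergeM m (pvPickG cur l) := by
  intro l
  induction l with
  | nil => intro d m; simp [pvPickG, pvMergeM]
  | cons p ps ih =>
    intro d m
    simp only [List.foldl_cons, pvPickG]
    by_cases hc : cur > p.2
    · simp only [hc, if_pos]
      have h2 : pvStepV cur (d, m) p = ((pvStepV cur (d, m) p).1, m) := by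
        cases d with
        | none => simp [pvStepV, hc]
        | some q => by_cases h1 : p.2 > q.2 <;> simp [pvStepV, hc, h1]
      rw [h2, ih]
    · simp only [hc, if_neg, not_false_iff]
      have eV : pvStepV cur (d, m) p = if p.2 > m.2 then (d, p) else (d, m) := by
        simp [pvStepV, hc]
      rw [eV]
      by_cases h1 : p.2 > m.2 <;>
        [rw [if_pos h1, ih]; rw [if_neg h1, ih]] <;>
        (cases hr : pvPickG cur ps with
         | none => simp only [pvMergeM]; (try split_ifs) <;> first | rfl | (exfalso; omega)
         | some q' =>
           by_cases h2 : q'.2 > p.2 <;>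
             simp only [h2, if_pos, if_neg, not_false_iff, pvMergeM] <;>
               split_ifs <;> first | rfl | (exfalso; omega))

lemma pvFoldlMax_eq (t : List Int) (x : Int) (h : ∀ y ∈ t, y ≤ x) :
    t.foldl max x = x := by
  induction t generalizing x with
  | nil => rfl
  | cons a t ih =>
    simp only [List.foldl_cons]
    have ha : a ≤ x := h a (by simp)
    rw [max_eq_left ha]
    exact ih x fun y hy => h y (List.mem_cons_of_mem _ hy)

lemma pvFoldlMax_mem (t : List Int) (x v : Int) (hv : v ∈ t)
    (hle : ∀ y ∈ t, y ≤ v) (hx : x ≤ v) : t.foldl max x = v := by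
  induction t generalizing x with
  | nil => cases hv
  | cons a t ih =>
    simp only [List.foldl_cons]
    rcases List.mem_cons.mp hv with h | h
    · subst h
      by_cases ht : v ∈ t
      · exact ih (max x v) ht (fun y hy => hle y (List.mem_cons_of_mem _ hy)) (max_le hx le_rfl)
      · rw [max_eq_right hx]
        exact pvFoldlMax_eq t v (fun y hy => hle y (List.mem_cons_of_mem _ hy))
    · exact ih (max x a) h (fun y hy => hle y (List.mem_cons_of_mem _ hy))
        (max_le hx (hle a (by simp)))

lemma pvPickB_enum (cur : Int) :
    ∀ (xs : List Int) (k : Int),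
      pvPickB cur (PySem.List.enumerate xs k)
        = (PySem.List.max? (xs.filter (fun c => decide (c < cur))) (fun y => y)).map
            (fun v => (k + (((PySem.List.index? xs v).getD 0 : Nat) : Int), v)) := by
  intro xs
  induction xs with
  | nil => intro k; rfl
  | cons x xs ih =>
    intro k
    rw [PySem.List.enumerate_cons]
    simp only [pvPickB]
    rw [ih (k + 1)]
    by_cases hx : cur > x
    · rw [if_pos hx]
      have hf : (x :: xs).filter (fun c => decide (c < cur))
          = x :: xs.filter (fun c => decide (c < cur)) := by
        simp [List.filter_cons, hx]
      rw [hf]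
      cases hr : PySem.List.max? (xs.filter (fun c => decide (c < cur))) (fun y => y) with
      | none =>
        have hnil := (PySem.List.max?_eq_none_iff _ _).mp hr
        rw [hnil, PySem.List.max?_id_cons]
        simp only [List.foldl_nil, Option.map_some]
        rw [PySem.List.index?_cons_self]
        norm_num
      | some v =>
        have hvmem' : v ∈ xs.filter (fun c => decide (c < cur)) := PySem.List.max?_mem hr
        have hvxs : v ∈ xs := (List.mem_filter.mp hvmem').1
        have hvlt : v < cur := by simpa using (List.mem_filter.mp hvmem').2
        have hmax : ∀ y ∈ xs.filter (fun c => decide (c < cur)), y ≤ v := by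
          intro y hy; simpa using PySem.List.max?_isMax hr y hy
        by_cases h2 : v > x
        · simp only [Option.map_some, if_pos h2]
          have hfm : (xs.filter (fun c => decide (c < cur))).foldl max x = v :=
            pvFoldlMax_mem _ _ _ hvmem' hmax (le_of_lt h2)
          rw [PySem.List.max?_id_cons, hfm, Option.map_some]
          have hne : x ≠ v := by omega
          obtain ⟨i0, hi0⟩ := Option.isSome_iff_exists.mp
            ((PySem.List.index?_isSome_iff _ _).mpr hvxs)
          rw [PySem.List.index?_cons_of_ne xs hne, hi0]
          simp only [hi0, Option.map_some, Option.getD_some, Prod.mk.injEq, and_true,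
            Option.some.injEq]
          push_cast; ring
        · simp only [Option.map_some, if_neg h2]
          have hfm : (xs.filter (fun c => decide (c < cur))).foldl max x = x :=
            pvFoldlMax_eq _ _ (fun y hy => le_trans (hmax y hy) (by omega))
          rw [PySem.List.max?_id_cons, hfm, Option.map_some,
            PySem.List.index?_cons_self]
          simp
    · rw [if_neg hx]
      have hf : (x :: xs).filter (fun c => decide (c < cur))
          = xs.filter (fun c => decide (c < cur)) := by
        simp only [List.filter_cons]
        have : ¬ (x < cur) := hx
        simp [this]
      rw [hf]
      cases hr : PySem.List.max? (xs.filter (fun c => decide (c < cur))) (fun y => y) with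
      | none => simp
      | some v =>
        have hvmem' : v ∈ xs.filter (fun c => decide (c < cur)) := PySem.List.max?_mem hr
        have hvxs : v ∈ xs := (List.mem_filter.mp hvmem').1
        have hvlt : v < cur := by simpa using (List.mem_filter.mp hvmem').2
        have hne : x ≠ v := by omega
        obtain ⟨i0, hi0⟩ := Option.isSome_iff_exists.mp
          ((PySem.List.index?_isSome_iff _ _).mpr hvxs)
        simp only [Option.map_some]
        rw [PySem.List.index?_cons_of_ne xs hne, hi0]
        simp only [hi0, Option.map_some, Option.getD_some, Prod.mk.injEq, and_true,
          Option.some.injEq]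
        push_cast; ring

lemma pvPickG_enum (cur : Int) :
    ∀ (xs : List Int) (k : Int),
      pvPickG cur (PySem.List.enumerate xs k)
        = (PySem.List.max? (xs.filter (fun c => !decide (cur > c))) (fun y => y)).map
            (fun v => (k + (((PySem.List.index? xs v).getD 0 : Nat) : Int), v)) := by
  intro xs
  induction xs with
  | nil => intro k; rfl
  | cons x xs ih =>
    intro k
    rw [PySem.List.enumerate_cons]
    simp only [pvPickG]
    rw [ih (k + 1)]
    by_cases hx : cur > x
    · rw [if_pos hx]
      have hf : (x :: xs).filter (fun c => !decide (cur > c))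
          = xs.filter (fun c => !decide (cur > c)) := by
        simp [List.filter_cons, hx]
      rw [hf]
      cases hr : PySem.List.max? (xs.filter (fun c => !decide (cur > c))) (fun y => y) with
      | none => simp
      | some v =>
        have hvmem' : v ∈ xs.filter (fun c => !decide (cur > c)) := PySem.List.max?_mem hr
        have hvxs : v ∈ xs := (List.mem_filter.mp hvmem').1
        have hvge : ¬ (cur > v) := by simpa using (List.mem_filter.mp hvmem').2
        have hne : x ≠ v := by omega
        obtain ⟨i0, hi0⟩ := Option.isSome_iff_exists.mp
          ((PySem.List.index?_isSome_iff _ _).mpr hvxs)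
        simp only [Option.map_some]
        rw [PySem.List.index?_cons_of_ne xs hne, hi0]
        simp only [hi0, Option.map_some, Option.getD_some, Prod.mk.injEq, and_true,
          Option.some.injEq]
        push_cast; ring
    · rw [if_neg hx]
      have hf : (x :: xs).filter (fun c => !decide (cur > c))
          = x :: xs.filter (fun c => !decide (cur > c)) := by
        simp [List.filter_cons, hx]
      rw [hf]
      cases hr : PySem.List.max? (xs.filter (fun c => !decide (cur > c))) (fun y => y) with
      | none =>
        have hnil := (PySem.List.max?_eq_none_iff _ _).mp hr
        rw [hnil, PySem.List.max?_id_cons]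
        simp only [List.foldl_nil, Option.map_some]
        rw [PySem.List.index?_cons_self]
        norm_num
      | some v =>
        have hvmem' : v ∈ xs.filter (fun c => !decide (cur > c)) := PySem.List.max?_mem hr
        have hvxs : v ∈ xs := (List.mem_filter.mp hvmem').1
        have hvge : ¬ (cur > v) := by simpa using (List.mem_filter.mp hvmem').2
        have hmax : ∀ y ∈ xs.filter (fun c => !decide (cur > c)), y ≤ v := by
          intro y hy; simpa using PySem.List.max?_isMax hr y hy
        by_cases h2 : v > x
        · simp only [Option.map_some, if_pos h2]
          have hfm : (xs.filter (fun c => !decide (cur > c))).foldl max x = v :=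
            pvFoldlMax_mem _ _ _ hvmem' hmax (le_of_lt h2)
          rw [PySem.List.max?_id_cons, hfm, Option.map_some]
          have hne : x ≠ v := by omega
          obtain ⟨i0, hi0⟩ := Option.isSome_iff_exists.mp
            ((PySem.List.index?_isSome_iff _ _).mpr hvxs)
          rw [PySem.List.index?_cons_of_ne xs hne, hi0]
          simp only [hi0, Option.map_some, Option.getD_some, Prod.mk.injEq, and_true,
            Option.some.injEq]
          push_cast; ring
        · simp only [Option.map_some, if_neg h2]
          have hfm : (xs.filter (fun c => !decide (cur > c))).foldl max x = x :=
            pvFoldlMax_eq _ _ (fun y hy => le_trans (hmax y hy) (by omega))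
          rw [PySem.List.max?_id_cons, hfm, Option.map_some,
            PySem.List.index?_cons_self]
          simp

-- the heart of the proof: A's destination index equals B's located index
lemma pvCut (cur : Int) (rem : List Int) (h : rem ≠ []) :
    (((PySem.List.enumerate rem).foldl (pvStepA rem cur) (none, 0)).1.getD
        ((PySem.List.enumerate rem).foldl (pvStepA rem cur) (none, 0)).2)
      = (((PySem.List.index? rem
            (if rem.filter (fun c => decide (c < cur)) ≠ [] then
              (PySem.List.max? (rem.filter (fun c => decide (c < cur))) (fun y => y)).getD 0
            else (PySem.List.max? rem (fun y => y)).getD 0)).getD 0 : Nat) : Int) := by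
  obtain ⟨x0, xs, rfl⟩ := List.exists_cons_of_ne_nil h
  have hall : ∀ p ∈ PySem.List.enumerate (x0 :: xs) 0,
      PySem.List.pyGetD (x0 :: xs) p.1 0 = p.2 := by
    intro p hp
    obtain ⟨kk, hk, rfl⟩ := (PySem.List.mem_enumerate_iff _ _ _).mp hp
    simp only [zero_add]
    rw [PySem.List.pyGetD_natCast]
    exact List.getD_eq_getElem _ _ hk
  have hsim := pvSim (x0 :: xs) cur (PySem.List.enumerate (x0 :: xs) 0)
    none (0, x0) hall (by intro q hq; cases hq)
    (PySem.List.pyGetD_zero_cons x0 xs 0)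
  simp only [Option.map_none] at hsim
  rw [hsim, pvFoldV_fst, pvFoldV_snd, pvPickB_enum, pvPickG_enum]
  by_cases hbl : (x0 :: xs).filter (fun c => decide (c < cur)) = []
  · -- no cup below the current one: A falls back to the running max index,
    -- B locates the maximum of all remaining cups
    rw [if_neg]
    swap
    · simp [hbl]
    rw [hbl]
    simp only [PySem.List.max?_eq_none_iff _ (fun y : Int => y) |>.mpr rfl,
      Option.map_none, pvMergeD, Option.getD_none]
    have hge : ∀ c ∈ (x0 :: xs), ¬ (c < cur) := by
      intro c hc
      have := List.filter_eq_nil_iff.mp hbl c hc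
      simpa using this
    have hfself : (x0 :: xs).filter (fun c => !decide (cur > c)) = x0 :: xs := by
      apply List.filter_eq_self.mpr
      intro a ha
      simpa using hge a ha
    rw [hfself]
    cases hr : PySem.List.max? (x0 :: xs) (fun y : Int => y) with
    | none => exact absurd ((PySem.List.max?_eq_none_iff _ _).mp hr) (by simp)
    | some v =>
      have hvmem : v ∈ x0 :: xs := PySem.List.max?_mem hr
      have hmax : ∀ y ∈ x0 :: xs, y ≤ v := fun y hy => PySem.List.max?_isMax hr y hy
      simp only [Option.map_some, pvMergeM, Option.getD_some]
      by_cases h2 : v > x0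
      · rw [if_pos h2]
        norm_num
      · rw [if_neg h2]
        have hx0 : x0 ≤ v := hmax x0 (by simp)
        have : v = x0 := by omega
        subst this
        rw [PySem.List.index?_cons_self]
        norm_num
  · -- some cup is below the current one: both pick the first maximum below
    rw [if_pos hbl]
    cases hr : PySem.List.max? ((x0 :: xs).filter (fun c => decide (c < cur)))
        (fun y : Int => y) with
    | none => exact absurd ((PySem.List.max?_eq_none_iff _ _).mp hr) hbl
    | some v =>
      simp only [Option.map_some, pvMergeD, Option.getD_some]
      norm_num

-- ===== VERDICT (by name: the statement is the Claim_ definition above) =====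
theorem move_cups_naive_spec : Claim_equal_move_cups_naive := by
  intro cups n _ hpre
  unfold Spec_move_cups_naive move_cups_naive move_cups_naive_alt
  simp only []
  by_cases hrem : PySem.List.slice cups (some (1 + n)) none = ([] : List Int)
  · rw [hrem, if_pos rfl]
    simp [pysem]
  · rw [if_neg hrem, pvCut (PySem.List.pyGetD cups 0 0) _ hrem]
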